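-- pv_equiv track=rewrite | github.com/JeremyMet/DES | src/ANF.py | to_monomial
-- ===== SOURCE A (Python) =====
-- def to_monomial(i):
--     ret = "" ;
--     cpt = 0 ;
--     if i==0:
--         return "1" ;
--     while(i > 0):
--         if (i & 1):
--             ret+="x_{"+str(cpt)+"}" ;
--         i = i >> 1 ;
--         cpt+=1
--     return ret ;
-- ===== SOURCE B (Python) =====
-- def to_monomial(i):
--     if i == 0:
--         return "1"
--     out = ""
--     while i > 0:
--         k = i.bit_length() - 1        # index of the highest set bit
--         out = "x_{" + str(k) + "}" + out
--         i -= 1 << k                   # clear that bit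
--     return out
-- ===== Notes on version B (the rewrite author's own statement) =====
-- stated objective: alternative
-- what changed: B extracts set bits from the most-significant end (one bit_length computation and one subtraction per SET bit, prepending tokens so the result is built back-to-front), instead of A's per-bit LSB right-shift loop that appends per bit.
import Mathlib
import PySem

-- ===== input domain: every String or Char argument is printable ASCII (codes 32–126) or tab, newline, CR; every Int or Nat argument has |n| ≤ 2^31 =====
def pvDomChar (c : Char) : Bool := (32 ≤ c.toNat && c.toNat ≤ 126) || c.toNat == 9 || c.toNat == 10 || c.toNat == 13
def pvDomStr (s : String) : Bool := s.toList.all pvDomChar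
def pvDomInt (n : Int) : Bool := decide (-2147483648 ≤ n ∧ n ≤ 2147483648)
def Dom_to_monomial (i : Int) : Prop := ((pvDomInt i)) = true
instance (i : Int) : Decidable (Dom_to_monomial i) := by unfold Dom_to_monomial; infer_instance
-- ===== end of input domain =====

-- B extracts set bits from the most-significant end with bit_length, building the string
-- back-to-front (one iteration per SET bit), instead of A's per-bit LSB shift loop
-- (objective: alternative; same return value on every int, no speed claim).

-- ===== PORT A =====
-- the while-loop: state (i, cpt, ret) exactly as in the Python
def to_monomial_go (i : Int) (cpt : Int) (ret : String) : String :=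
  if _h : 0 < i then
    to_monomial_go (i >>> (1 : Nat)) (cpt + 1)
      (if PySem.Int.band i 1 ≠ 0 then ret ++ "x_{" ++ PySem.Int.toStr cpt ++ "}" else ret)
  else ret
termination_by i.toNat
decreasing_by
  rw [Int.shiftRight_eq_div_pow]
  norm_num
  omega

def to_monomial (i : Int) : String :=
  if i == 0 then "1" else to_monomial_go i 0 ""

-- ===== PORT B =====
-- the while-loop of Source B: k = i.bit_length() - 1; out = token k ++ out; i -= 1 << k
def to_monomial_alt_go (i : Int) (out : String) : String :=
  if _h : 0 < i then
    let k : Nat := PySem.Int.bitLength i - 1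
    to_monomial_alt_go (i - (1 : Int) <<< k) ("x_{" ++ PySem.Int.toStr (k : Int) ++ "}" ++ out)
  else out
termination_by i.toNat
decreasing_by
  have h2 : (1 : Int) ≤ (1 : Int) <<< (PySem.Int.bitLength i - 1) := by
    have h3 : (1 : Int) <<< (PySem.Int.bitLength i - 1) = 2 ^ (PySem.Int.bitLength i - 1) := by
      simp [Int.shiftLeft_eq]
    rw [h3]
    exact one_le_pow₀ one_le_two
  have h4 : (1 : Int) <<< k = (1 : Int) <<< (PySem.Int.bitLength i - 1) := rfl
  omega

def to_monomial_alt (i : Int) : String :=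
  if i == 0 then "1" else to_monomial_alt_go i ""

-- ===== PRECONDITION & SPEC =====
def Spec_to_monomial (i : Int) (out : String) : Prop := out = to_monomial_alt i
instance (i : Int) (out : String) : Decidable (Spec_to_monomial i out) := by unfold Spec_to_monomial; infer_instance

-- ===== CLAIM (what is proved, stated in full; the proofs are below) =====
def Claim_equal_to_monomial : Prop := ∀ (i : Int), Dom_to_monomial i → Spec_to_monomial i (to_monomial i)

-- ===== LEMMAS AND PROOFS =====

-- binary digits least-significant first
def pvLsb (n : Nat) : List Char :=
  if h : n = 0 then [] else Nat.digitChar (n % 2) :: pvLsb (n / 2)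
decreasing_by exact Nat.div_lt_self (Nat.pos_of_ne_zero h) one_lt_two

-- the monomial string encoded by a digit list, start index s
def pvRender (bits : List Char) (s : Int) : String :=
  PySem.Str.join ""
    (((PySem.List.enumerate bits s).filter (fun p => p.2 == '1')).map
      (fun p => "x_{" ++ PySem.Int.toStr p.1 ++ "}"))

theorem pv_join_empty_cons (x : String) (xs : List String) :
    PySem.Str.join "" (x :: xs) = x ++ PySem.Str.join "" xs := by
  apply String.toList_injective
  cases xs with
  | nil =>
      simp [PySem.Str.toList_join, PySem.Chars.join_singleton, PySem.Chars.join_nil]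
  | cons y ys =>
      simp [PySem.Str.toList_join, PySem.Chars.join_cons_cons]

theorem pvRender_nil (s : Int) : pvRender [] s = "" := by
  apply String.toList_injective
  simp [pvRender, PySem.List.enumerate_nil, PySem.Str.toList_join, PySem.Chars.join_nil]

theorem pvRender_cons_one (bits : List Char) (s : Int) :
    pvRender ('1' :: bits) s = ("x_{" ++ PySem.Int.toStr s ++ "}") ++ pvRender bits (s + 1) := by
  unfold pvRender
  rw [PySem.List.enumerate_cons]
  simp only [List.filter_cons]
  norm_num
  exact pv_join_empty_cons _ _

theorem pvRender_cons_zero (c : Char) (hc : c ≠ '1') (bits : List Char) (s : Int) :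
    pvRender (c :: bits) s = pvRender bits (s + 1) := by
  unfold pvRender
  rw [PySem.List.enumerate_cons]
  simp only [List.filter_cons]
  simp [hc]

theorem pvLsb_succ (n : Nat) (h : n ≠ 0) :
    pvLsb n = Nat.digitChar (n % 2) :: pvLsb (n / 2) := by
  rw [pvLsb]
  simp [h]

-- A's loop computes the render of the LSB-first digit list
theorem pv_go_eq (n : Nat) : ∀ (cpt : Int) (ret : String),
    to_monomial_go (n : Int) cpt ret = ret ++ pvRender (pvLsb n) cpt := by
  induction n using Nat.strong_induction_on with
  | _ n ih =>
    intro cpt ret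
    by_cases h0 : n = 0
    · subst h0
      rw [to_monomial_go]
      simp [pvLsb, pvRender_nil]
    · have hpos : (0 : Int) < (n : Int) := by exact_mod_cast Nat.pos_of_ne_zero h0
      rw [to_monomial_go, dif_pos hpos]
      have hshift : ((n : Int) >>> (1 : Nat)) = ((n / 2 : Nat) : Int) := by
        rw [Int.shiftRight_eq_div_pow]
        norm_num
      have hband : PySem.Int.band (n : Int) 1 = ((n % 2 : Nat) : Int) := by
        rw [PySem.Int.band_one]
        show Int.fmod (n : Int) 2 = ((n % 2 : Nat) : Int)
        rw [Int.fmod_eq_emod]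
        simp
      rw [hshift, ih (n / 2) (Nat.div_lt_self (Nat.pos_of_ne_zero h0) one_lt_two)]
      rw [pvLsb_succ n h0]
      by_cases hodd : n % 2 = 1
      · rw [if_pos (by rw [hband, hodd]; decide)]
        rw [hodd]
        show ret ++ "x_{" ++ PySem.Int.toStr cpt ++ "}" ++ pvRender (pvLsb (n / 2)) (cpt + 1) =
          ret ++ pvRender ('1' :: pvLsb (n / 2)) cpt
        rw [pvRender_cons_one]
        simp [String.append_assoc]
      · have hev : n % 2 = 0 := by omega
        rw [if_neg (by rw [hband, hev]; decide), hev]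
        show ret ++ pvRender (pvLsb (n / 2)) (cpt + 1) = ret ++ pvRender ('0' :: pvLsb (n / 2)) cpt
        rw [pvRender_cons_zero '0' (by decide)]

-- ---- B-side lemmas ----

theorem pvLsb_length_le (k : Nat) : ∀ (m : Nat), m < 2 ^ k → (pvLsb m).length ≤ k := by
  induction k with
  | zero => intro m hm; interval_cases m; simp [pvLsb]
  | succ k ih =>
      intro m hm
      by_cases h0 : m = 0
      · subst h0; simp [pvLsb]
      · rw [pvLsb_succ m h0]
        have := ih (m / 2) (by omega)
        simpa using Nat.succ_le_succ this

theorem pvLsb_add_pow (k : Nat) : ∀ (m : Nat), m < 2 ^ k →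
    pvLsb (m + 2 ^ k) = pvLsb m ++ List.replicate (k - (pvLsb m).length) '0' ++ ['1'] := by
  induction k with
  | zero =>
      intro m hm; interval_cases m
      have h00 : pvLsb 0 = [] := by rw [pvLsb]; simp
      rw [show (0 + 2 ^ 0 : Nat) = 1 from rfl, pvLsb_succ 1 one_ne_zero, h00]
      norm_num [h00]
      rfl
  | succ k ih =>
      intro m hm
      have hne : m + 2 ^ (k + 1) ≠ 0 := by positivity
      rw [pvLsb_succ _ hne]
      have hmod : (m + 2 ^ (k + 1)) % 2 = m % 2 := by omega
      have hdiv : (m + 2 ^ (k + 1)) / 2 = m / 2 + 2 ^ k := by omega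
      rw [hmod, hdiv, ih (m / 2) (by omega)]
      by_cases h0 : m = 0
      · subst h0; simp [pvLsb, List.replicate_succ]
        rfl
      · rw [pvLsb_succ m h0]
        have hlen : (pvLsb (m / 2)).length ≤ k := pvLsb_length_le k (m / 2) (by omega)
        simp only [List.length_cons]
        have : k + 1 - ((pvLsb (m / 2)).length + 1) = k - (pvLsb (m / 2)).length := by omega
        rw [this]
        simp

theorem pvRender_append (bits : List Char) : ∀ (tail : List Char) (s : Int),
    pvRender (bits ++ tail) s = pvRender bits s ++ pvRender tail (s + bits.length) := by
  induction bits with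
  | nil =>
      intro tail s
      simp [pvRender_nil]
  | cons c bs ih =>
      intro tail s
      by_cases hc : c = '1'
      · subst hc
        rw [List.cons_append, pvRender_cons_one, pvRender_cons_one, ih, List.length_cons]
        rw [show ((bs.length + 1 : Nat) : Int) = (bs.length : Int) + 1 from by push_cast; ring]
        rw [show s + ((bs.length : Int) + 1) = s + 1 + (bs.length : Int) from by ring]
        simp [String.append_assoc]
      · rw [List.cons_append, pvRender_cons_zero c hc, pvRender_cons_zero c hc, ih, List.length_cons]
        rw [show ((bs.length + 1 : Nat) : Int) = (bs.length : Int) + 1 from by push_cast; ring]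
        rw [show s + ((bs.length : Int) + 1) = s + 1 + (bs.length : Int) from by ring]

theorem pvRender_replicate (j : Nat) : ∀ (s : Int), pvRender (List.replicate j '0') s = "" := by
  induction j with
  | zero => intro s; exact pvRender_nil s
  | succ j ih =>
      intro s
      rw [List.replicate_succ, pvRender_cons_zero '0' (by decide)]
      exact ih _

theorem pvRender_single_one (s : Int) :
    pvRender ['1'] s = "x_{" ++ PySem.Int.toStr s ++ "}" := by
  rw [pvRender_cons_one, pvRender_nil]
  simp

-- removing the top set bit splits the render
theorem pv_split (k m : Nat) (hm : m < 2 ^ k) :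
    pvRender (pvLsb (m + 2 ^ k)) 0 =
      pvRender (pvLsb m) 0 ++ ("x_{" ++ PySem.Int.toStr (k : Int) ++ "}") := by
  have hlen := pvLsb_length_le k m hm
  rw [pvLsb_add_pow k m hm, pvRender_append, pvRender_append, pvRender_replicate]
  rw [show (pvLsb m ++ List.replicate (k - (pvLsb m).length) '0').length = k from by
    simp only [List.length_append, List.length_replicate]; omega]
  rw [show ((0 : Int) + (k : Nat)) = (k : Int) from by ring]
  rw [pvRender_single_one]
  simp

theorem pv_aux_succ (f n : Nat) :
    PySem.Int.bitLengthAux (f + 1) n = if n = 0 then 0 else PySem.Int.bitLengthAux f (n / 2) + 1 := rfl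

theorem pv_aux_zero (f : Nat) : PySem.Int.bitLengthAux f 0 = 0 := by
  cases f with
  | zero => rfl
  | succ f => rw [pv_aux_succ]; simp

theorem pv_aux_bounds (f : Nat) : ∀ (n : Nat), n ≠ 0 → n ≤ f →
    1 ≤ PySem.Int.bitLengthAux f n ∧
    2 ^ (PySem.Int.bitLengthAux f n - 1) ≤ n ∧ n < 2 ^ PySem.Int.bitLengthAux f n := by
  induction f with
  | zero => intro n h0 hf; omega
  | succ f ih =>
      intro n h0 hf
      rw [pv_aux_succ]
      simp only [h0, if_false]
      by_cases h2 : 2 ≤ n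
      · obtain ⟨hb1, hb2, hb3⟩ := ih (n / 2) (by omega) (by omega)
        set b := PySem.Int.bitLengthAux f (n / 2) with hb
        refine ⟨by omega, ?_, ?_⟩
        · have e1 : 2 ^ (b + 1 - 1) = 2 * 2 ^ (b - 1) := by
            rw [show b + 1 - 1 = (b - 1) + 1 from by omega]; ring
          omega
        · have e2 : 2 ^ (b + 1) = 2 * 2 ^ b := by ring
          omega
      · have h1 : n = 1 := by omega
        subst h1
        norm_num [pv_aux_zero]

theorem pv_bitLength_bounds (n : Nat) (h : n ≠ 0) :
    1 ≤ PySem.Int.bitLength (n : Int) ∧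
    2 ^ (PySem.Int.bitLength (n : Int) - 1) ≤ n ∧ n < 2 ^ PySem.Int.bitLength (n : Int) := by
  unfold PySem.Int.bitLength
  simp only [Int.natAbs_natCast]
  exact pv_aux_bounds (n + 1) n h (by omega)

-- B's loop computes the same render
theorem pv_alt_go_eq (n : Nat) : ∀ (out : String),
    to_monomial_alt_go (n : Int) out = pvRender (pvLsb n) 0 ++ out := by
  induction n using Nat.strong_induction_on with
  | _ n ih =>
    intro out
    by_cases h0 : n = 0
    · subst h0
      rw [to_monomial_alt_go.eq_def]
      simp [pvLsb, pvRender_nil]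
    · have hpos : (0 : Int) < (n : Int) := by exact_mod_cast Nat.pos_of_ne_zero h0
      rw [to_monomial_alt_go.eq_def, dif_pos hpos]
      obtain ⟨hb1, hb2, hb3⟩ := pv_bitLength_bounds n h0
      set k : Nat := PySem.Int.bitLength (n : Int) - 1 with hk
      show to_monomial_alt_go ((n : Int) - (1 : Int) <<< k)
          ("x_{" ++ PySem.Int.toStr (k : Int) ++ "}" ++ out) = pvRender (pvLsb n) 0 ++ out
      have hle : 2 ^ k ≤ n := hb2
      have hlt : n < 2 ^ (k + 1) := by
        rw [show k + 1 = PySem.Int.bitLength (n : Int) from by omega]; exact hb3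
      set m := n - 2 ^ k with hm
      have hmlt : m < 2 ^ k := by
        have e : 2 ^ (k + 1) = 2 ^ k + 2 ^ k := by ring
        omega
      have hshift : ((n : Int) - (1 : Int) <<< k) = ((m : Int)) := by
        have h1 : (1 : Int) <<< k = 2 ^ k := by simp [Int.shiftLeft_eq]
        rw [h1, hm]
        push_cast [Nat.cast_sub hle]
        ring
      have h2pow : 1 ≤ 2 ^ k := Nat.one_le_two_pow
      rw [hshift, ih m (by omega)]
      have hsplit := pv_split k m hmlt
      rw [show m + 2 ^ k = n from by omega] at hsplit
      rw [hsplit]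
      simp [String.append_assoc]

-- ===== VERDICT (by name: the statement is the Claim_ definition above) =====
theorem to_monomial_spec : Claim_equal_to_monomial := by
  intro i _
  unfold Spec_to_monomial to_monomial to_monomial_alt
  rcases lt_trichotomy i 0 with hneg | hz | hpos
  · rw [if_neg (by simpa using hneg.ne), if_neg (by simpa using hneg.ne)]
    rw [to_monomial_go, dif_neg (by omega), to_monomial_alt_go.eq_def, dif_neg (by omega)]
  · subst hz
    simp
  · rw [if_neg (by simpa using hpos.ne'), if_neg (by simpa using hpos.ne')]
    have hcast : i = ((i.toNat : Nat) : Int) := by omega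
    rw [hcast, pv_go_eq i.toNat 0 "", pv_alt_go_eq i.toNat ""]
    simp
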